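-- pv_equiv track=rewrite | github.com/JanQ/generatingfunctionology-solutions | supplements/ch4/ex4_13.py | f
-- ===== SOURCE A (Python) =====
-- from math import comb
--
-- def f(s, r):
--     ret = 0
--     for m in range(r + 1):
--         b = r - s + m
--         if b < 0 or b > r:
--             continue
--         ret += ((-1) ** m) * comb(r, m) * comb(r, b)
--     return ret
-- ===== SOURCE B (Python) =====
-- from math import comb
--
-- def f(s, r):
--     # Closed form: coefficient of x^s in (1-x^2)^r.
--     if r < 0 or s < 0 or s > 2 * r or s % 2 == 1:
--         return 0
--     h = s // 2
--     return (-1) ** h * comb(r, h)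
-- ===== Notes on version B (the rewrite author's own statement) =====
-- stated objective: faster
-- what changed: Replaces the O(r)-term alternating convolution sum of binomial coefficients by the closed form for the coefficient of x^s in (1-x^2)^r: 0 if s is odd or out of range, else (-1)^(s/2)*C(r,s/2).
import Mathlib
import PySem

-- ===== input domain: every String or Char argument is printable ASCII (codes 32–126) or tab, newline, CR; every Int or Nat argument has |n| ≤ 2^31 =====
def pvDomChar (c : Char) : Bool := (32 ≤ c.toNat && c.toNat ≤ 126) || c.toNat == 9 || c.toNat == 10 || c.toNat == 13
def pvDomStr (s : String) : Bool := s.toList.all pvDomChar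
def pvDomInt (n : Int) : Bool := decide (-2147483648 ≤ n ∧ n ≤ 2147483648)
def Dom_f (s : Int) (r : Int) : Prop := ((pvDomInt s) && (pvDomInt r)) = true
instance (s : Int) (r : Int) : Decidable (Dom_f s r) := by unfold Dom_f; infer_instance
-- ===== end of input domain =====

-- B replaces A's alternating convolution loop of binomial coefficients by the closed
-- form for the coefficient of x^s in (1-x^2)^r (objective: faster).

-- ===== PORT A =====
-- math.comb(n, k); exact for 0 ≤ k and 0 ≤ n — the only calls A makes (its loop
-- guard ensures both arguments are in [0, r] before comb is called).
def pyCombA (n k : Int) : Int := (Nat.choose n.toNat k.toNat : Int)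

-- (-1) ** m is ported as (-1)^m.toNat; exact since m ∈ range(r+1) is nonnegative.
def f (s : Int) (r : Int) : Int :=
  (PySem.List.pyRange 0 (r + 1) 1).foldl
    (fun ret m =>
      let b := r - s + m
      if b < 0 ∨ b > r then ret
      else ret + (-1 : Int) ^ m.toNat * pyCombA r m * pyCombA r b) 0

-- ===== PORT B =====
-- math.comb(r, h); exact since B only calls it with 0 ≤ h ≤ r.
def pyCombB (n k : Int) : Int := (Nat.choose n.toNat k.toNat : Int)

-- (-1) ** h is ported as (-1)^h.toNat; exact since h = s // 2 ≥ 0 on the taken branch.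
def f_alt (s : Int) (r : Int) : Int :=
  if r < 0 ∨ s < 0 ∨ s > 2 * r ∨ PySem.Int.mod s 2 = 1 then 0
  else
    let h := PySem.Int.floordiv s 2
    (-1 : Int) ^ h.toNat * pyCombB r h

-- ===== PRECONDITION & SPEC =====
def Spec_f (s : Int) (r : Int) (out : Int) : Prop := out = f_alt s r
instance (s : Int) (r : Int) (out : Int) : Decidable (Spec_f s r out) := by unfold Spec_f; infer_instance

-- ===== CLAIM (what is proved, stated in full; the proofs are below) =====
def Claim_equal_f : Prop := ∀ (s : Int) (r : Int), Dom_f s r → Spec_f s r (f s r)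

-- ===== LEMMAS AND PROOFS =====

-- A foldl that conditionally adds is the sum of the conditional terms.
lemma foldl_if_add (p : Int → Prop) [DecidablePred p] (t : Int → Int) :
    ∀ (l : List Int) (a : Int),
      l.foldl (fun ret m => if p m then ret else ret + t m) a
        = a + (l.map (fun m => if p m then 0 else t m)).sum := by
  intro l
  induction l with
  | nil => simp
  | cons x xs ih =>
    intro a
    by_cases hx : p x <;> simp [hx, ih, add_assoc]

lemma sum_list_range (n : ℕ) (g : ℕ → ℤ) :
    ((List.range n).map g).sum = ∑ i ∈ Finset.range n, g i := by
  induction n with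
  | zero => simp
  | succ n ih => simp [List.range_succ, Finset.sum_range_succ, ih]

lemma coeff_one_sub_X_pow (n k : ℕ) :
    ((1 - Polynomial.X : Polynomial ℤ) ^ n).coeff k = (-1) ^ k * n.choose k := by
  have h : (1 - Polynomial.X : Polynomial ℤ)
      = Polynomial.C (-1) * (Polynomial.X + Polynomial.C (-1)) := by
    rw [Polynomial.C_neg, Polynomial.C_1]; ring
  rw [h, mul_pow, ← Polynomial.C_pow, Polynomial.coeff_C_mul, Polynomial.coeff_X_add_C_pow]
  by_cases hk : k ≤ n
  · have hsign : (-1 : ℤ) ^ n * (-1) ^ (n - k) = (-1) ^ k := by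
      rw [← pow_add, show n + (n - k) = 2 * (n - k) + k by omega, pow_add, pow_mul]
      norm_num
    rw [← mul_assoc, hsign]
  · rw [Nat.choose_eq_zero_of_lt (by omega)]
    simp

lemma coeff_one_sub_X_sq_pow (n t : ℕ) :
    ((1 - Polynomial.X ^ 2 : Polynomial ℤ) ^ n).coeff t
      = if t % 2 = 1 then 0 else (-1 : ℤ) ^ (t / 2) * n.choose (t / 2) := by
  have h : (1 - Polynomial.X ^ 2 : Polynomial ℤ)
      = Polynomial.C (-1 : ℤ) * Polynomial.X ^ 2 + 1 := by
    rw [Polynomial.C_neg, Polynomial.C_1]; ring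
  rw [h, add_pow]
  have hterm : ∀ k : ℕ,
      ((Polynomial.C (-1 : ℤ) * Polynomial.X ^ 2) ^ k * 1 ^ (n - k) * (n.choose k : Polynomial ℤ))
        = Polynomial.C ((-1 : ℤ) ^ k * n.choose k) * Polynomial.X ^ (2 * k) := by
    intro k
    rw [one_pow, mul_one, mul_pow, ← Polynomial.C_pow, ← pow_mul,
      ← Polynomial.C_eq_natCast, mul_right_comm, ← Polynomial.C_mul]
  rw [Finset.sum_congr rfl (fun k _ => hterm k), Polynomial.finset_sum_coeff]
  simp only [Polynomial.coeff_C_mul, Polynomial.coeff_X_pow, mul_ite, mul_one, mul_zero]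
  by_cases hodd : t % 2 = 1
  · rw [Finset.sum_eq_zero, if_pos hodd]
    intro k _
    rw [if_neg (by omega)]
  · rw [if_neg hodd, Finset.sum_eq_single (t / 2)]
    · rw [if_pos (by omega)]
    · intro k _ hk
      rw [if_neg (by omega)]
    · intro h2
      rw [Finset.mem_range, not_lt] at h2
      rw [if_pos (by omega), Nat.choose_eq_zero_of_lt (by omega)]
      simp

-- The combinatorial identity behind B: A's alternating convolution is the
-- coefficient of x^t in (1-x^2)^n, which has the closed form B computes.
lemma key (n t : ℕ) :
    (∑ m ∈ Finset.range (n + 1),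
        if ((n : ℤ) - t + m < 0 ∨ (n : ℤ) - t + m > n) then 0
        else (-1 : ℤ) ^ m * n.choose m * n.choose ((n : ℤ) - t + m).toNat)
      = if t % 2 = 1 then 0 else (-1 : ℤ) ^ (t / 2) * n.choose (t / 2) := by
  -- Step A: normalise each term to nat-subtraction form.
  have stepA : ∀ m ∈ Finset.range (n + 1),
      (if ((n : ℤ) - t + m < 0 ∨ (n : ℤ) - t + m > n) then 0
        else (-1 : ℤ) ^ m * n.choose m * n.choose ((n : ℤ) - t + m).toNat)
      = (if m ≤ t then (-1 : ℤ) ^ m * n.choose m * n.choose (t - m) else 0) := by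
    intro m hm
    rw [Finset.mem_range] at hm
    by_cases h1 : m ≤ t
    · by_cases h2 : (n : ℤ) - t + m < 0
      · rw [if_pos (Or.inl h2), if_pos h1,
          Nat.choose_eq_zero_of_lt (show n < t - m by omega)]
        simp
      · rw [if_neg (by omega), if_pos h1]
        have : ((n : ℤ) - t + m).toNat = n - (t - m) := by omega
        rw [this, Nat.choose_symm (by omega)]
    · rw [if_pos (Or.inr (by omega)), if_neg h1]
  rw [Finset.sum_congr rfl stepA]
  -- Step B: re-index over range (t+1) via a common superset range (n+t+1).
  have stepB : (∑ m ∈ Finset.range (n + 1),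
        if m ≤ t then (-1 : ℤ) ^ m * n.choose m * n.choose (t - m) else 0)
      = ∑ m ∈ Finset.range (t + 1), (-1 : ℤ) ^ m * n.choose m * n.choose (t - m) := by
    have h1 : (∑ m ∈ Finset.range (n + 1),
          if m ≤ t then (-1 : ℤ) ^ m * n.choose m * n.choose (t - m) else 0)
        = ∑ m ∈ Finset.range (n + t + 1),
          if m ≤ t then (-1 : ℤ) ^ m * n.choose m * n.choose (t - m) else 0 := by
      apply Finset.sum_subset (Finset.range_subset.2 (fun x hx => Finset.mem_range.2 (by omega)))
      intro m _ hm
      rw [Finset.mem_range, not_lt] at hm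
      split_ifs with h
      · rw [Nat.choose_eq_zero_of_lt (show n < m by omega)]; simp
      · rfl
    have h2 : (∑ m ∈ Finset.range (t + 1),
          if m ≤ t then (-1 : ℤ) ^ m * n.choose m * n.choose (t - m) else 0)
        = ∑ m ∈ Finset.range (n + t + 1),
          if m ≤ t then (-1 : ℤ) ^ m * n.choose m * n.choose (t - m) else 0 := by
      apply Finset.sum_subset (Finset.range_subset.2 (fun x hx => Finset.mem_range.2 (by omega)))
      intro m _ hm
      rw [Finset.mem_range, not_lt] at hm
      rw [if_neg (by omega)]
    have h3 : (∑ m ∈ Finset.range (t + 1),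
          if m ≤ t then (-1 : ℤ) ^ m * n.choose m * n.choose (t - m) else 0)
        = ∑ m ∈ Finset.range (t + 1), (-1 : ℤ) ^ m * n.choose m * n.choose (t - m) := by
      apply Finset.sum_congr rfl
      intro m hm
      rw [Finset.mem_range] at hm
      rw [if_pos (by omega)]
    rw [h1, ← h2, h3]
  rw [stepB]
  -- Step C: this is the coefficient of x^t in (1-x)^n (1+x)^n = (1-x^2)^n.
  have stepC : (∑ m ∈ Finset.range (t + 1), (-1 : ℤ) ^ m * n.choose m * n.choose (t - m))
      = ((1 - Polynomial.X : Polynomial ℤ) ^ n * (1 + Polynomial.X) ^ n).coeff t := by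
    rw [Polynomial.coeff_mul, Finset.Nat.sum_antidiagonal_eq_sum_range_succ_mk]
    apply Finset.sum_congr rfl
    intro m _
    rw [coeff_one_sub_X_pow, Polynomial.coeff_one_add_X_pow, mul_assoc]
  have stepD : ((1 - Polynomial.X : Polynomial ℤ) ^ n * (1 + Polynomial.X) ^ n)
      = (1 - Polynomial.X ^ 2) ^ n := by
    rw [← mul_pow]; ring
  rw [stepC, stepD, coeff_one_sub_X_sq_pow]

-- ===== VERDICT (by name: the statement is the Claim_ definition above) =====
theorem f_spec : Claim_equal_f := by
  intro s r _
  unfold Spec_f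
  show (PySem.List.pyRange 0 (r + 1) 1).foldl
      (fun ret m =>
        if r - s + m < 0 ∨ r - s + m > r then ret
        else ret + (-1 : Int) ^ m.toNat * pyCombA r m * pyCombA r (r - s + m)) 0 = f_alt s r
  rw [foldl_if_add (fun m => r - s + m < 0 ∨ r - s + m > r)
      (fun m => (-1 : Int) ^ m.toNat * pyCombA r m * pyCombA r (r - s + m)), zero_add]
  by_cases hr : r < 0
  · rw [PySem.List.pyRange_one_eq_nil (by omega)]
    simp [f_alt, hr]
  · push_neg at hr
    by_cases hs : s < 0
    · rw [List.sum_eq_zero, f_alt, if_pos (Or.inr (Or.inl hs))]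
      intro x hx
      rw [List.mem_map] at hx
      obtain ⟨m, hm, rfl⟩ := hx
      rw [PySem.List.mem_pyRange_one] at hm
      rw [if_pos (Or.inr (by omega))]
    · push_neg at hs
      obtain ⟨n, rfl⟩ : ∃ n : ℕ, r = (n : ℤ) := ⟨r.toNat, by omega⟩
      obtain ⟨t, rfl⟩ : ∃ t : ℕ, s = (t : ℤ) := ⟨s.toNat, by omega⟩
      rw [PySem.List.pyRange_one, List.map_map,
        show (((n : ℤ) + 1) - 0).toNat = n + 1 by omega, sum_list_range]
      have hpt : ∀ i ∈ Finset.range (n + 1),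
          ((fun m => if (n : ℤ) - t + m < 0 ∨ (n : ℤ) - t + m > n then 0
              else (-1 : ℤ) ^ m.toNat * pyCombA n m * pyCombA n ((n : ℤ) - t + m)) ∘
            (fun k : ℕ => (0 : ℤ) + k)) i
          = (if ((n : ℤ) - t + i < 0 ∨ (n : ℤ) - t + i > n) then 0
              else (-1 : ℤ) ^ i * n.choose i * n.choose ((n : ℤ) - t + i).toNat) := by
        intro i _
        simp only [Function.comp_apply, zero_add, pyCombA, Int.toNat_natCast]
      rw [Finset.sum_congr rfl hpt, key n t]
      -- match B's closed form
      by_cases hodd : t % 2 = 1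
      · rw [if_pos hodd, f_alt, if_pos]
        right; right; right
        rw [PySem.Int.mod_eq_emod_of_pos (by norm_num)]
        omega
      · rw [if_neg hodd]
        by_cases hbig : (t : ℤ) > 2 * (n : ℤ)
        · rw [f_alt, if_pos (Or.inr (Or.inr (Or.inl hbig))),
            Nat.choose_eq_zero_of_lt (show n < t / 2 by omega)]
          simp
        · rw [f_alt, if_neg (by
            push_neg
            refine ⟨by omega, by omega, by omega, ?_⟩
            rw [PySem.Int.mod_eq_emod_of_pos (by norm_num)]
            omega)]
          have hh : PySem.Int.floordiv (t : ℤ) 2 = ((t / 2 : ℕ) : ℤ) := by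
            rw [PySem.Int.floordiv_eq_ediv_of_pos (by norm_num)]
            omega
          simp only [hh, pyCombB, Int.toNat_natCast]
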